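-- pv_equiv track=rewrite | github.com/AustinKong/job-scraper-cli | ui/components/bullets.py | _absolute_cursor
-- ===== SOURCE A (Python) =====
-- from typing import Callable, List, Optional, Tuple
--
-- def _render(items: List[str]) -> str:
--   return "\n".join(f"{i+1}. {items[i]}" for i in range(len(items))) if items else "1. "
--
-- def _absolute_cursor(row: int, content_col: int, items: List[str]) -> int:
--   pos = 0
--   for r in range(len(items)):
--     pref = f"{r+1}. "
--     content = items[r]
--
--     if r == row:
--       return pos + len(pref) + min(content_col, len(content))
--
--     pos += len(pref) + len(content) + 1
--
--   return len(_render(items))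
-- ===== SOURCE B (Python) =====
-- from typing import List
--
-- def _render(items: List[str]) -> str:
--   return "\n".join(f"{i+1}. {items[i]}" for i in range(len(items))) if items else "1. "
--
-- def _absolute_cursor(row: int, content_col: int, items: List[str]) -> int:
--   # Guard first; then measure the rendered prefix instead of accumulating in a loop.
--   if not (0 <= row < len(items)):
--     return len(_render(items))
--   pos = len(_render(items[:row])) + 1 if row else 0
--   return pos + len(f"{row+1}. ") + min(content_col, len(items[row]))
-- ===== Notes on version B (the rewrite author's own statement) =====
-- stated objective: alternative
-- what changed: Replaces A's accumulating early-return loop over all rows with a range guard followed by direct measurement of the rendered prefix: pos = len(_render(items[:row])) + 1 (0 for row 0), plus the numbering prefix length and the clamped column.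
import Mathlib
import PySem

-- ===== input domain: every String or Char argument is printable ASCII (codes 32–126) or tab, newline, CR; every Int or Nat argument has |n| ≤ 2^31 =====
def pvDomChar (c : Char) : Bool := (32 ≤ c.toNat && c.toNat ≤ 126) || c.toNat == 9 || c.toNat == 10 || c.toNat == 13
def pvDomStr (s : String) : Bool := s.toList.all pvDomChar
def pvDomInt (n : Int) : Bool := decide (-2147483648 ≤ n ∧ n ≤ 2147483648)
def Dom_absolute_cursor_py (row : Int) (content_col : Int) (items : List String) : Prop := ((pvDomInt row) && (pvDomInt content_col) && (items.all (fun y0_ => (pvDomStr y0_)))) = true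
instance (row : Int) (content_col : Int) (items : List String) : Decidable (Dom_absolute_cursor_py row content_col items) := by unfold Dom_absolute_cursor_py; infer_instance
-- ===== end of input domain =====

-- B guards on 0 <= row < len(items) and measures the rendered prefix _render(items[:row])
-- directly instead of A's accumulating early-return loop (objective: alternative decomposition;
-- same asymptotic cost).


-- ===== PORT A =====
-- module helper _render (shared by both Python sources), over List Char
def render_chars (items : List String) : List Char :=
  if items ≠ [] then
    PySem.Chars.join ['\n']
      ((List.range items.length).map
        (fun (i : Nat) => PySem.Int.toChars ((i : Int) + 1) ++ ['.', ' '] ++ (items.getD i "").toList))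
  else ['1', '.', ' ']

-- the 'for r in range(len(items))' loop of _absolute_cursor, with accumulator pos
def absA_loop (row content_col : Int) (items : List String) (r : Nat) (pos : Int) : Int :=
  if h : r < items.length then
    let pref := PySem.Int.toChars ((r : Int) + 1) ++ ['.', ' ']
    let content := items.getD r ""
    if (r : Int) = row then pos + (pref.length : Int) + min content_col (content.toList.length : Int)
    else absA_loop row content_col items (r + 1) (pos + (pref.length : Int) + (content.toList.length : Int) + 1)
  else ((render_chars items).length : Int)
termination_by items.length - r

def absolute_cursor_py (row : Int) (content_col : Int) (items : List String) : Int :=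
  absA_loop row content_col items 0 0

-- ===== PORT B =====
def absolute_cursor_py_alt (row : Int) (content_col : Int) (items : List String) : Int :=
  if 0 ≤ row ∧ row < (items.length : Int) then
    -- pos = len(_render(items[:row])) + 1 if row else 0; items[row] is in range under the guard, so getD is exact here
    (if row ≠ 0 then ((render_chars (PySem.List.slice items none (some row))).length : Int) + 1 else 0)
      + ((PySem.Int.toChars (row + 1) ++ ['.', ' ']).length : Int)
      + min content_col (((items.getD row.toNat "").toList.length : Int))
  else ((render_chars items).length : Int)

-- ===== PRECONDITION & SPEC =====
def Spec_absolute_cursor_py (row : Int) (content_col : Int) (items : List String) (out : Int) : Prop := out = absolute_cursor_py_alt row content_col items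
instance (row : Int) (content_col : Int) (items : List String) (out : Int) : Decidable (Spec_absolute_cursor_py row content_col items out) := by unfold Spec_absolute_cursor_py; infer_instance

-- ===== CLAIM (what is proved, stated in full; the proofs are below) =====
def Claim_equal_absolute_cursor_py : Prop := ∀ (row : Int) (content_col : Int) (items : List String), Dom_absolute_cursor_py row content_col items → Spec_absolute_cursor_py row content_col items (absolute_cursor_py row content_col items)

-- ===== LEMMAS AND PROOFS =====

-- length of line i of the rendering
def lineLenN (items : List String) (i : Nat) : Nat :=
  (PySem.Int.toChars ((i : Int) + 1)).length + 2 + (items.getD i "").toList.length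

lemma join_newline_length (ls : List (List Char)) (h : ls ≠ []) :
    (PySem.Chars.join ['\n'] ls).length = (ls.map List.length).sum + (ls.length - 1) := by
  induction ls with
  | nil => simp at h
  | cons p rest ih =>
    cases rest with
    | nil => simp [PySem.Chars.join_singleton]
    | cons q rest' =>
      rw [PySem.Chars.join_cons_cons, List.length_append, List.length_append, ih (by simp)]
      simp only [List.map_cons, List.sum_cons, List.length_cons, List.length_nil]
      omega

lemma render_chars_length (items : List String) (h : items ≠ []) :
    (render_chars items).length
      = ((List.range items.length).map (lineLenN items)).sum + (items.length - 1) := by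
  unfold render_chars
  rw [if_pos h, join_newline_length _ (by
    simp only [ne_eq, List.map_eq_nil_iff, List.range_eq_nil]
    exact fun hc => h (List.length_eq_zero_iff.mp hc))]
  simp only [List.map_map, List.length_map, List.length_range]
  congr 1
  apply congrArg
  apply List.map_congr_left
  intro i hi
  simp [lineLenN, Function.comp, List.length_append]
  omega


lemma absA_loop_miss (row content_col : Int) (items : List String)
    (hrow : ∀ k : Nat, k < items.length → (k : Int) ≠ row) :
    ∀ r pos, absA_loop row content_col items r pos = ((render_chars items).length : Int) := by
  intro r
  induction hd : items.length - r generalizing r with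
  | zero =>
    intro pos
    rw [absA_loop]
    rw [dif_neg (by omega)]
  | succ d ih =>
    intro pos
    rw [absA_loop]
    have hr : r < items.length := by omega
    rw [dif_pos hr, if_neg (hrow r hr)]
    exact ih (r + 1) (by omega) _

lemma absA_loop_hit (content_col : Int) (items : List String) (m : Nat) (hm : m < items.length) :
    ∀ r pos, r ≤ m →
      absA_loop (m : Int) content_col items r pos
        = pos + (((List.range' r (m - r)).map (fun i => (lineLenN items i : Int) + 1)).sum)
          + ((PySem.Int.toChars ((m : Int) + 1)).length + 2 : Int)
          + min content_col ((items.getD m "").toList.length : Int) := by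
  intro r
  induction hd : m - r generalizing r with
  | zero =>
    intro pos hr
    have : r = m := by omega
    subst this
    rw [absA_loop, dif_pos hm, if_pos rfl]
    simp only [List.range'_zero, List.map_nil, List.sum_nil, add_zero,
      List.length_append, List.length_cons, List.length_nil]
    push_cast
    ring
  | succ d ih =>
    intro pos hr
    have hrm : r < m := by omega
    rw [absA_loop, dif_pos (by omega), if_neg (by exact_mod_cast Nat.ne_of_lt hrm)]
    rw [ih (r + 1) (by omega) _ (by omega), List.range'_succ]
    simp only [List.map_cons, List.sum_cons, lineLenN, List.length_append,
      List.length_cons, List.length_nil]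
    push_cast
    ring

-- ===== VERDICT (by name: the statement is the Claim_ definition above) =====
theorem absolute_cursor_py_spec : Claim_equal_absolute_cursor_py := by
  intro row content_col items _
  unfold Spec_absolute_cursor_py absolute_cursor_py absolute_cursor_py_alt
  by_cases hin : 0 ≤ row ∧ row < (items.length : Int)
  · rw [if_pos hin]
    obtain ⟨h0, hlt⟩ := hin
    obtain ⟨m, rfl⟩ : ∃ m : Nat, row = (m : Int) := ⟨row.toNat, by omega⟩
    have hmlt : m < items.length := by omega
    rw [absA_loop_hit content_col items m hmlt 0 0 (by omega)]
    by_cases hm0 : (m : Int) ≠ 0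
    · rw [if_pos hm0]
      have hmpos : 0 < m := by omega
      rw [PySem.List.slice_to_natCast]
      have htk : (items.take m) ≠ [] :=
        List.ne_nil_of_length_pos (by simp [List.length_take]; omega)
      rw [render_chars_length _ htk]
      have hlen : (items.take m).length = m := by
        simp; omega
      rw [hlen]
      have hgd : ((List.range m).map (lineLenN (items.take m))).sum
          = ((List.range m).map (lineLenN items)).sum := by
        apply congrArg
        apply List.map_congr_left
        intro i hi
        simp only [List.mem_range] at hi
        unfold lineLenN
        congr 2
        rw [List.getD_eq_getElem?_getD, List.getD_eq_getElem?_getD,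
            List.getElem?_take_of_lt hi]
      rw [hgd]
      have hsum : (((List.range' 0 (m - 0)).map (fun i => (lineLenN items i : Int) + 1)).sum)
          = (((List.range m).map (lineLenN items)).sum : Int) + m := by
        rw [Nat.sub_zero, ← List.range_eq_range']
        have hsplit : (fun i => ((lineLenN items i : Nat) : Int) + 1)
            = fun i => ((fun j => ((lineLenN items j : Nat) : Int)) i + (fun _ => (1 : Int)) i) := rfl
        rw [hsplit, PySem.List.sum_map_add_int, PySem.List.sum_map_const_int]
        rw [Nat.cast_list_sum, List.map_map]
        simp [Function.comp_def]
      rw [hsum]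
      simp only [List.length_append, List.length_cons, List.length_nil, Int.toNat_natCast]
      push_cast
      omega
    · rw [if_neg hm0]
      have : m = 0 := by omega
      subst this
      simp [List.length_append]
  · rw [if_neg hin]
    apply absA_loop_miss
    intro k hk
    omega
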